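-- pv_equiv track=rewrite | github.com/jonathanking/sidechainnet | sidechainnet/openmm/openmmpdb.py | get_zeroindexed_gap_positions
-- ===== SOURCE A (Python) =====
-- def get_zeroindexed_gap_positions(mask, return_lengths=False):
--     """Return [start-1, end+1] position of every gap in mask, zero-indexed.
--
--     Args:
--         mask (str): A SidechainNet mask (sequence of '+' and '-') marking sequence gaps.
--         return_lengths (bool): If True, also return lengths of each interior gap.
--
--     Returns:
--         list: A list of indices describing the residues immediately preceding and
--         following each internal gap in the mask. The numbers are indexed counting only
--         the present residues. If there are not internal gaps, returns an empty list.
--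
--         If return_lengths == True, returns a Tuple whose second element is a list of the
--         relevant gap lengths.
--
--     Examples:
--         >>> get_zeroindexed_gap_positions("+++--+")
--         [2, 3]
--         >>> get_zeroindexed_gap_positions("+++--+", True)
--         ([2, 3], [2])
--         >>> get_zeroindexed_gap_positions("+++-------+")
--         [2, 3]
--         >>> get_zeroindexed_gap_positions("---++++++---")
--         []
--     """
--     gap_locs = []
--     gap_lengths = []
--     gap_len_counter = 0
--     cur_pos = 0
--     in_gap = False
--     for m in mask:
--         if cur_pos == 0 and m == "-":
--             in_gap = True
--         elif m == "+" and not in_gap: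
--             cur_pos += 1
--         elif m == "-" and not in_gap:
--             gap_locs.append(cur_pos - 1)
--             in_gap = True
--             gap_len_counter += 1
--         elif m == "-" and in_gap:
--             gap_len_counter += 1
--             continue
--         elif m == "+" and in_gap and cur_pos != 0:
--             in_gap = False
--             gap_locs.append(cur_pos)
--             gap_lengths.append(gap_len_counter)
--             gap_len_counter = 0
--             cur_pos += 1
--         elif m == "+" and in_gap and cur_pos == 0:
--             in_gap = False
--             cur_pos += 1
--     if in_gap:
--         gap_locs.pop()
--
--     if return_lengths:
--         return gap_locs, gap_lengths
--
--     return gap_locs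
-- ===== SOURCE B (Python) =====
-- def get_zeroindexed_gap_positions(mask, return_lengths=False):
--     """Run-based reimplementation: filter to '+'/'-', strip outer dashes,
--     then scan alternating plus/dash runs with two indices."""
--     core = ''.join(c for c in mask if c in '+-').strip('-')
--     locs = []
--     lens = []
--     total = 0
--     i, n = 0, len(core)
--     while i < n:
--         j = i
--         while j < n and core[j] == '+':
--             j += 1
--         total += j - i
--         if j == n:
--             break
--         k = j
--         while k < n and core[k] == '-':
--             k += 1
--         locs.append(total - 1)
--         locs.append(total)
--         lens.append(k - j)
--         i = k
--     if return_lengths: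
--         return locs, lens
--     return locs
-- ===== Notes on version B (the rewrite author's own statement) =====
-- stated objective: alternative
-- what changed: A is a five-variable per-character state machine (cur_pos/in_gap/counter with a trailing pop); B first reduces the mask by filtering to '+'/'-' and stripping outer dashes, then scans the remaining alternating '+'/'-' runs with two indices, emitting both boundaries and the gap length of each internal gap in one shot, with no in_gap flag and no final pop. Pre_ additionally restricts to return_lengths=True, since with False both programs return a bare list, not a value of the declared pair type.
-- outside the precondition, e.g. on get_zeroindexed_gap_positions('+++--+', False): A returns (2, 3), B returns (2, 3); on get_zeroindexed_gap_positions('+', False): A returns (), B returns (); on get_zeroindexed_gap_positions('-', False): A raises IndexError, B returns ()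
import Mathlib
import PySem

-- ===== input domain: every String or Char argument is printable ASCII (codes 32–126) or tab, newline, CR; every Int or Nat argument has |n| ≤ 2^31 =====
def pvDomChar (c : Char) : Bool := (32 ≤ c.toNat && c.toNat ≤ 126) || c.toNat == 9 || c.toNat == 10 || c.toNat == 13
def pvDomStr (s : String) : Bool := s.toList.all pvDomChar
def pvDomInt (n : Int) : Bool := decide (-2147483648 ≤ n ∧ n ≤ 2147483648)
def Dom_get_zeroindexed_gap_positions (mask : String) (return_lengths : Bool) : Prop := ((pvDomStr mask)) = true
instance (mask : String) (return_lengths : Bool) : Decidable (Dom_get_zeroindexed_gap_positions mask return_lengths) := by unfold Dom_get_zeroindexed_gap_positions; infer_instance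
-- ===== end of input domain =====

-- B replaces A's five-variable per-character state machine by filter + strip('-') + a scan of the
-- alternating '+'/'-' runs (objective: alternative decomposition, no speed claim).

-- ===== PORT A =====
-- loop state: (gap_locs, gap_lengths, gap_len_counter, cur_pos, in_gap)
def pvAStep (s : List Int × List Int × Int × Int × Bool) (m : Char) :
    List Int × List Int × Int × Int × Bool :=
  match s with
  | (locs, lens, cnt, pos, ing) =>
    if pos == 0 && m == '-' then (locs, lens, cnt, pos, true)
    else if m == '+' && !ing then (locs, lens, cnt, pos + 1, ing)
    else if m == '-' && !ing then (locs ++ [pos - 1], lens, cnt + 1, pos, true)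
    else if m == '-' && ing then (locs, lens, cnt + 1, pos, ing)
    else if m == '+' && ing && !(pos == 0) then (locs ++ [pos], lens ++ [cnt], 0, pos + 1, false)
    else if m == '+' && ing && pos == 0 then (locs, lens, cnt, pos + 1, false)
    else (locs, lens, cnt, pos, ing)

def get_zeroindexed_gap_positions (mask : String) (return_lengths : Bool) : List Int × List Int :=
  let r := mask.toList.foldl pvAStep ([], [], 0, 0, false)
  -- gap_locs.pop(): raises IndexError on an empty list (excluded by Pre_); otherwise drops the last element
  let gap_locs := if r.2.2.2.2 then r.1.dropLast else r.1
  if return_lengths then (gap_locs, r.2.1) else (gap_locs, [])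

-- ===== PORT B =====
def pvRel (c : Char) : Bool := c == '+' || c == '-'

-- hand port of str.strip('-') : exact (drop '-' from both ends)
def pvRstrip (cs : List Char) : List Char := (cs.reverse.dropWhile (· == '-')).reverse
def pvStrip (cs : List Char) : List Char := pvRstrip (cs.dropWhile (· == '-'))

-- the while-loop of Source B over the run structure of `core`; the two inner index-advancing while
-- loops are takeWhile/dropWhile; fuel only makes the recursion total (core has only '+'/'-')
def pvBGo : Nat → Int → List Char → List Int × List Int
  | 0, _, _ => ([], [])
  | fuel + 1, total, cs =>
    let plus := cs.takeWhile (· == '+')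
    let rest := cs.dropWhile (· == '+')
    let total' := total + plus.length
    match rest with
    | [] => ([], [])
    | _ :: _ =>
      let gap := rest.takeWhile (· == '-')
      let rest' := rest.dropWhile (· == '-')
      let r := pvBGo fuel total' rest'
      ((total' - 1) :: total' :: r.1, (gap.length : Int) :: r.2)

def get_zeroindexed_gap_positions_alt (mask : String) (return_lengths : Bool) : List Int × List Int :=
  let core := pvStrip (mask.toList.filter pvRel)
  let r := pvBGo (core.length + 1) 0 core
  if return_lengths then r else (r.1, [])

-- ===== PRECONDITION & SPEC =====
-- Pre_ excludes (a) the masks on which A raises IndexError (gap_locs.pop() on an empty list):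
-- those containing a '-' but no '+'; and (b) return_lengths = false, where A returns a bare list
-- instead of a value of the declared pair type List Int × List Int (B does the same there).
def Pre_get_zeroindexed_gap_positions (mask : String) (return_lengths : Bool) : Prop :=
  return_lengths = true ∧ (mask.toList.contains '-' = true → mask.toList.contains '+' = true)
instance (mask : String) (return_lengths : Bool) : Decidable (Pre_get_zeroindexed_gap_positions mask return_lengths) := by unfold Pre_get_zeroindexed_gap_positions; infer_instance

def pvWitness_get_zeroindexed_gap_positions : String × Bool := ("++--+", true)

def Spec_get_zeroindexed_gap_positions (mask : String) (return_lengths : Bool) (out : List Int × List Int) : Prop := out = get_zeroindexed_gap_positions_alt mask return_lengths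
instance (mask : String) (return_lengths : Bool) (out : List Int × List Int) : Decidable (Spec_get_zeroindexed_gap_positions mask return_lengths out) := by unfold Spec_get_zeroindexed_gap_positions; infer_instance

-- ===== CLAIM (what is proved, stated in full; the proofs are below) =====
def Claim_equal_get_zeroindexed_gap_positions : Prop := ∀ (mask : String) (return_lengths : Bool), Dom_get_zeroindexed_gap_positions mask return_lengths → Pre_get_zeroindexed_gap_positions mask return_lengths → Spec_get_zeroindexed_gap_positions mask return_lengths (get_zeroindexed_gap_positions mask return_lengths)

-- ===== LEMMAS AND PROOFS =====

def pvFinish (s : List Int × List Int × Int × Int × Bool) : List Int × List Int :=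
  (if s.2.2.2.2 then s.1.dropLast else s.1, s.2.1)

-- a character that is neither '+' nor '-' leaves A's state unchanged
theorem pv_step_other (s : List Int × List Int × Int × Int × Bool) (c : Char)
    (h : pvRel c = false) : pvAStep s c = s := by
  obtain ⟨l, le, cnt, p, ing⟩ := s
  simp [pvRel] at h
  simp [pvAStep, h.1, h.2]

theorem pv_foldl_filter (cs : List Char) (s : List Int × List Int × Int × Int × Bool) :
    cs.foldl pvAStep s = (cs.filter pvRel).foldl pvAStep s := by
  induction cs generalizing s with
  | nil => rfl
  | cons c cs ih =>
    by_cases h : pvRel c = true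
    · simp [h, List.foldl_cons, ih]
    · rw [Bool.not_eq_true] at h
      simp [h, List.foldl_cons, pv_step_other _ _ h, ih]

theorem pv_step_plus_noing (l le : List Int) (cnt p : Int) :
    pvAStep (l, le, cnt, p, false) '+' = (l, le, cnt, p + 1, false) := by
  simp [pvAStep]

theorem pv_step_plus_ing (l le : List Int) (cnt p : Int) (hp : p ≠ 0) :
    pvAStep (l, le, cnt, p, true) '+' = (l ++ [p], le ++ [cnt], 0, p + 1, false) := by
  simp [pvAStep, hp]

theorem pv_step_dash_noing (l le : List Int) (cnt p : Int) (hp : p ≠ 0) :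
    pvAStep (l, le, cnt, p, false) '-' = (l ++ [p - 1], le, cnt + 1, p, true) := by
  simp [pvAStep, hp]

theorem pv_step_dash_ing (l le : List Int) (cnt p : Int) (hp : p ≠ 0) :
    pvAStep (l, le, cnt, p, true) '-' = (l, le, cnt + 1, p, true) := by
  simp [pvAStep, hp]

-- a run of '+' just advances cur_pos
theorem pv_plusRun (a : Nat) (l le : List Int) (cnt p : Int) :
    (List.replicate a '+').foldl pvAStep (l, le, cnt, p, false) = (l, le, cnt, p + a, false) := by
  induction a generalizing p with
  | zero => simp
  | succ a ih =>
    rw [List.replicate_succ, List.foldl_cons, pv_step_plus_noing, ih]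
    congr 2
    push_cast
    ring

-- inside a gap (cur_pos ≠ 0), a run of '-' only grows the counter
theorem pv_dashRun (b : Nat) (l le : List Int) (cnt p : Int) (hp : p ≠ 0) :
    (List.replicate b '-').foldl pvAStep (l, le, cnt, p, true) = (l, le, cnt + b, p, true) := by
  induction b generalizing cnt with
  | zero => simp
  | succ b ih =>
    rw [List.replicate_succ, List.foldl_cons, pv_step_dash_ing _ _ _ _ hp, ih]
    congr 3
    push_cast
    ring

-- a whole '-' run entered from outside a gap, cur_pos ≠ 0
theorem pv_dashRunFull (b : Nat) (l le : List Int) (p : Int) (hp : p ≠ 0) :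
    (List.replicate (b + 1) '-').foldl pvAStep (l, le, 0, p, false)
      = (l ++ [p - 1], le, (b : Int) + 1, p, true) := by
  rw [List.replicate_succ, List.foldl_cons, pv_step_dash_noing _ _ _ _ hp,
    pv_dashRun b _ _ _ _ hp]
  congr 3
  ring

-- while cur_pos = 0 and nothing is recorded, the in_gap flag does not matter
theorem pv_ing0 (cs : List Char) :
    pvFinish (cs.foldl pvAStep ([], [], 0, 0, true))
      = pvFinish (cs.foldl pvAStep ([], [], 0, 0, false)) := by
  induction cs with
  | nil => simp [pvFinish]
  | cons c cs ih =>
    by_cases hplus : c = '+'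
    · subst hplus
      rw [List.foldl_cons, List.foldl_cons, pv_step_plus_noing]
      have : pvAStep ([], [], 0, 0, true) '+' = ([], [], 0, 0 + 1, false) := by
        simp [pvAStep]
      rw [this]
    · by_cases hdash : c = '-'
      · subst hdash
        have h1 : pvAStep (([] : List Int), ([] : List Int), (0 : Int), (0 : Int), true) '-'
            = ([], [], 0, 0, true) := by simp [pvAStep]
        have h2 : pvAStep (([] : List Int), ([] : List Int), (0 : Int), (0 : Int), false) '-'
            = ([], [], 0, 0, true) := by simp [pvAStep]
        rw [List.foldl_cons, List.foldl_cons, h1, h2, ih]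
      · have h : pvRel c = false := by simp [pvRel, hplus, hdash]
        rw [List.foldl_cons, List.foldl_cons, pv_step_other _ _ h, pv_step_other _ _ h, ih]

-- leading dashes are ignored
theorem pv_lead (cs : List Char) :
    pvFinish (cs.foldl pvAStep ([], [], 0, 0, false))
      = pvFinish ((cs.dropWhile (· == '-')).foldl pvAStep ([], [], 0, 0, false)) := by
  induction cs with
  | nil => rfl
  | cons c cs ih =>
    by_cases hdash : c = '-'
    · subst hdash
      have h2 : pvAStep (([] : List Int), ([] : List Int), (0 : Int), (0 : Int), false) '-'
          = ([], [], 0, 0, true) := by simp [pvAStep]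
      rw [List.dropWhile_cons_of_pos (by simp), List.foldl_cons, h2, pv_ing0, ih]
    · rw [List.dropWhile_cons_of_neg (by simp [hdash])]

-- rstrip distributes over append
theorem pv_rstrip_append (xs ys : List Char) :
    pvRstrip (xs ++ ys) = if pvRstrip ys = [] then pvRstrip xs else xs ++ pvRstrip ys := by
  unfold pvRstrip
  rw [List.reverse_append, List.dropWhile_append]
  by_cases h : ys.reverse.dropWhile (· == '-') = []
  · simp [h]
  · simp [h, List.isEmpty_iff, List.reverse_append]

theorem pv_rstrip_nil_iff (xs : List Char) : pvRstrip xs = [] ↔ ∀ c ∈ xs, c = '-' := by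
  unfold pvRstrip
  rw [List.reverse_eq_nil_iff, List.dropWhile_eq_nil_iff]
  constructor
  · intro h c hc
    have := h c (List.mem_reverse.mpr hc)
    simpa using this
  · intro h c hc
    simp [h c (List.mem_reverse.mp hc)]

theorem pv_rstrip_dash (b : Nat) : pvRstrip (List.replicate b '-') = [] := by
  rw [pv_rstrip_nil_iff]
  intro c hc
  exact List.eq_of_mem_replicate hc

theorem pv_rstrip_plus (a : Nat) : pvRstrip (List.replicate a '+') = List.replicate a '+' := by
  unfold pvRstrip
  rw [List.reverse_replicate]
  rw [show (List.replicate a '+').dropWhile (· == '-') = List.replicate a '+' by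
    cases a with
    | zero => rfl
    | succ a => rw [List.replicate_succ, List.dropWhile_cons_of_neg (by simp)]]
  exact List.reverse_replicate

theorem pv_rstrip_cons_plus (r : List Char) :
    pvRstrip ('+' :: r) = '+' :: pvRstrip r := by
  have := pv_rstrip_append ['+'] r
  simp only [List.singleton_append] at this
  rw [this]
  by_cases h : pvRstrip r = []
  · simp [h, show pvRstrip ['+'] = ['+'] from pv_rstrip_plus 1]
  · simp [h]

-- takeWhile/dropWhile on a replicate-run followed by a different head
theorem pv_take_rep (x y : Char) (a : Nat) (w : List Char) (hxy : y ≠ x) :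
    (List.replicate a x ++ y :: w).takeWhile (· == x) = List.replicate a x ∧
    (List.replicate a x ++ y :: w).dropWhile (· == x) = y :: w := by
  induction a with
  | zero =>
    simp [List.takeWhile_cons_of_neg, List.dropWhile_cons_of_neg, hxy]
  | succ a ih =>
    rw [List.replicate_succ]
    constructor
    · rw [List.cons_append, List.takeWhile_cons_of_pos (by simp), ih.1]
    · rw [List.cons_append, List.dropWhile_cons_of_pos (by simp), ih.2]

theorem pv_bgo_nil (f : Nat) (t : Int) : pvBGo f t [] = ([], []) := by
  cases f <;> rfl

theorem pv_bgo_plus (f : Nat) (t : Int) (a : Nat) :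
    pvBGo f t (List.replicate a '+') = ([], []) := by
  cases f with
  | zero => rfl
  | succ f =>
    show pvBGo (f + 1) t (List.replicate a '+') = ([], [])
    unfold pvBGo
    simp

theorem pv_bgo_cons_plus (f : Nat) (t : Int) (xs : List Char) :
    pvBGo (f + 1) t ('+' :: xs) = pvBGo (f + 1) (t + 1) xs := by
  unfold pvBGo
  rw [List.takeWhile_cons_of_pos (by simp), List.dropWhile_cons_of_pos (by simp)]
  have : t + (((xs.takeWhile (· == '+')).length + 1 : Nat) : Int)
      = t + 1 + ((xs.takeWhile (· == '+')).length : Int) := by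
    push_cast
    ring
  simp only [List.length_cons, this]

theorem pv_bgo_plus_prefix (f : Nat) (t : Int) (a : Nat) (ys : List Char) :
    pvBGo (f + 1) t (List.replicate a '+' ++ ys) = pvBGo (f + 1) (t + a) ys := by
  induction a generalizing t with
  | zero => simp
  | succ a ih =>
    rw [List.replicate_succ, List.cons_append, pv_bgo_cons_plus, ih]
    congr 1
    push_cast
    ring

theorem pv_bgo_cons_dash (f : Nat) (t : Int) (xs : List Char) :
    pvBGo (f + 1) t ('-' :: xs)
      = ((t - 1) :: t :: (pvBGo f t (xs.dropWhile (· == '-'))).1,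
         (((xs.takeWhile (· == '-')).length + 1 : Nat) : Int) :: (pvBGo f t (xs.dropWhile (· == '-'))).2) := by
  conv_lhs => rw [pvBGo.eq_def]
  simp

theorem pv_bgo_run (f₁ : Nat) (t : Int) (a b : Nat) (w : List Char) :
    pvBGo (f₁ + 1 + 1) t (List.replicate a '+' ++ List.replicate (b + 1) '-' ++ '+' :: w)
      = ((t + a - 1) :: (t + a) :: (pvBGo (f₁ + 1) (t + a + 1) w).1,
         ((b : Int) + 1) :: (pvBGo (f₁ + 1) (t + a + 1) w).2) := by
  have hform : List.replicate (b + 1) '-' ++ '+' :: w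
      = '-' :: (List.replicate b '-' ++ '+' :: w) := by
    rw [List.replicate_succ, List.cons_append]
  have hdrop := (pv_take_rep '-' '+' b w (by decide)).2
  have htake : (('-' :: (List.replicate b '-' ++ '+' :: w)).takeWhile (· == '-'))
      = List.replicate (b + 1) '-' := by
    rw [← hform]
    exact (pv_take_rep '-' '+' (b + 1) w (by decide)).1
  rw [List.append_assoc, hform, pv_bgo_plus_prefix, pv_bgo_cons_dash, hdrop, pv_bgo_cons_plus]
  have hlen : ((List.replicate b '-' ++ '+' :: w).takeWhile (· == '-')).length = b := by
    rw [(pv_take_rep '-' '+' b w (by decide)).1, List.length_replicate]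
  rw [hlen]
  push_cast
  ring_nf

-- the heart of the proof-- the heart of the proof: A's char loop (plus the final pop) computes B's run scan
theorem pv_main : ∀ (n : Nat) (cs : List Char), cs.length ≤ n →
    (∀ c ∈ cs, pvRel c = true) → ∀ (l le : List Int) (p : Int), 0 ≤ p →
    (cs.head? = some '-' → 0 < p) → ∀ f : Nat, (pvRstrip cs).length < f →
    pvFinish (cs.foldl pvAStep (l, le, 0, p, false))
      = (l ++ (pvBGo f p (pvRstrip cs)).1, le ++ (pvBGo f p (pvRstrip cs)).2) := by
  intro n
  induction n with
  | zero =>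
    intro cs hlen _ l le p _ _ f _
    have hnil : cs = [] := List.eq_nil_of_length_eq_zero (Nat.le_zero.mp hlen)
    subst hnil
    simp [pvFinish, pv_bgo_nil, pvRstrip]
  | succ n ih =>
    intro cs hlen hrel l le p hp hphead f hf
    -- name the leading '+' run and the remainder
    obtain ⟨t1, ht1⟩ : ∃ t1, cs.takeWhile (· == '+') = t1 := ⟨_, rfl⟩
    obtain ⟨r1, hr1⟩ : ∃ r1, cs.dropWhile (· == '+') = r1 := ⟨_, rfl⟩
    have hsplit : t1 ++ r1 = cs := by rw [← ht1, ← hr1]; exact List.takeWhile_append_dropWhile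
    have ht1rep : t1 = List.replicate t1.length '+' := by
      rw [← ht1]
      exact List.eq_replicate_length.mpr (fun c hc => by
        have := List.mem_takeWhile_imp hc; simpa using this)
    cases hr : r1 with
    | nil =>
      have hcs : cs = List.replicate t1.length '+' := by
        rw [← hsplit, hr, List.append_nil, ← ht1rep]
      rw [hcs, pv_plusRun, pv_rstrip_plus, pv_bgo_plus]
      simp [pvFinish]
    | cons c r1' =>
      subst hr
      -- the first char after the '+' run is '-'
      have hcneg : (c == '+') = false := by
        have := List.head?_dropWhile_not (· == '+') cs
        rw [hr1] at this; simpa using this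
      have hcmem : c ∈ cs := by
        rw [← hsplit]; exact List.mem_append_right _ List.mem_cons_self
      have hcdash : c = '-' := by
        have := hrel c hcmem
        simp [pvRel] at this
        rcases this with h | h
        · rw [h] at hcneg; simp at hcneg
        · exact h
      subst hcdash
      -- name the '-' run and the remainder
      obtain ⟨t2, ht2⟩ : ∃ t2, ('-' :: r1').takeWhile (· == '-') = t2 := ⟨_, rfl⟩
      obtain ⟨r2, hr2⟩ : ∃ r2, ('-' :: r1').dropWhile (· == '-') = r2 := ⟨_, rfl⟩
      have hsplit2 : t2 ++ r2 = '-' :: r1' := by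
        rw [← ht2, ← hr2]; exact List.takeWhile_append_dropWhile
      have ht2rep : t2 = List.replicate t2.length '-' := by
        rw [← ht2]
        exact List.eq_replicate_length.mpr (fun c hc => by
          have := List.mem_takeWhile_imp hc; simpa using this)
      obtain ⟨b', hb'⟩ : ∃ b', t2.length = b' + 1 := by
        rw [← ht2, List.takeWhile_cons_of_pos (by decide), List.length_cons]
        exact ⟨_, rfl⟩
      -- cur_pos after the '+' run is positive
      have hp' : 0 < p + (t1.length : Int) := by
        rcases Nat.eq_zero_or_pos t1.length with ha0 | hapos
        · have ht1nil : t1 = [] := List.eq_nil_of_length_eq_zero ha0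
          have : cs.head? = some '-' := by
            rw [← hsplit, ht1nil, List.nil_append]; rfl
          have := hphead this
          omega
        · omega
      have hp'ne : p + (t1.length : Int) ≠ 0 := by omega
      cases hrr : r2 with
      | nil =>
        -- the mask ends in this gap: A pops the opening boundary, B stripped it away
        have hcs : cs = List.replicate t1.length '+' ++ List.replicate (b' + 1) '-' := by
          rw [← hsplit, ← ht1rep]
          congr 1
          rw [hrr] at hsplit2
          rw [← hsplit2, List.append_nil, ht2rep, hb']
        rw [hcs, List.foldl_append, pv_plusRun, pv_dashRunFull _ _ _ _ hp'ne]
        rw [pv_rstrip_append, if_pos (pv_rstrip_dash _), pv_rstrip_plus, pv_bgo_plus]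
        simp [pvFinish]
      | cons d r3 =>
        subst hrr
        -- an internal gap: record both boundaries and its length, recurse on the tail
        have hdneg : (d == '-') = false := by
          have := List.head?_dropWhile_not (· == '-') ('-' :: r1')
          rw [hr2] at this; simpa using this
        have hdmem : d ∈ cs := by
          rw [← hsplit, ← hsplit2]
          exact List.mem_append_right _ (List.mem_append_right _ List.mem_cons_self)
        have hdplus : d = '+' := by
          have := hrel d hdmem
          simp [pvRel] at this
          rcases this with h | h
          · exact h
          · rw [h] at hdneg; simp at hdneg
        subst hdplus
        have hcs : cs = List.replicate t1.length '+'
            ++ (List.replicate (b' + 1) '-' ++ '+' :: r3) := by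
          rw [← hsplit, ← ht1rep, ← hsplit2, ht2rep, hb']
        have hr3rel : ∀ x ∈ r3, pvRel x = true := by
          intro x hx
          apply hrel
          rw [← hsplit, ← hsplit2]
          exact List.mem_append_right _
            (List.mem_append_right _ (List.mem_cons_of_mem _ hx))
        have hr3len : r3.length ≤ n := by
          have h1 : cs.length = t1.length + ((b' + 1) + (1 + r3.length)) := by
            rw [hcs]; simp; omega
          omega
        -- the stripped list decomposes the same way
        have hrs : pvRstrip cs = List.replicate t1.length '+'
            ++ (List.replicate (b' + 1) '-' ++ '+' :: pvRstrip r3) := by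
          rw [hcs, pv_rstrip_append, pv_rstrip_append, pv_rstrip_cons_plus]
          rw [if_neg (by simp), if_neg (by simp)]
        obtain ⟨f₀, rfl⟩ : ∃ f₀, f = f₀ + 1 := by
          cases f with
          | zero => exact absurd hf (Nat.not_lt_zero _)
          | succ f₀ => exact ⟨f₀, rfl⟩
        have hflen : (pvRstrip r3).length < f₀ ∧ 1 ≤ f₀ := by
          rw [hrs] at hf
          simp [List.length_append] at hf
          omega
        obtain ⟨f₁, rfl⟩ : ∃ f₁, f₀ = f₁ + 1 := by
          cases f₀ with
          | zero => omega
          | succ f₁ => exact ⟨f₁, rfl⟩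
        -- A over the three runs, then the induction hypothesis on the tail
        conv_lhs => rw [hcs, List.foldl_append, pv_plusRun, List.foldl_append,
          pv_dashRunFull _ _ _ _ hp'ne, List.foldl_cons, pv_step_plus_ing _ _ _ _ hp'ne]
        rw [ih r3 hr3len hr3rel _ _ _ (by omega) (fun _ => by omega) (f₁ + 1) hflen.1]
        -- B one run forward
        rw [hrs, ← List.append_assoc, pv_bgo_run]
        simp [List.append_assoc]

-- ===== VERDICT (by name: the statement is the Claim_ definition above) =====
theorem pv_key (cs : List Char) :
    pvFinish (cs.foldl pvAStep ([], [], 0, 0, false))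
      = pvBGo ((pvStrip (cs.filter pvRel)).length + 1) 0 (pvStrip (cs.filter pvRel)) := by
  rw [pv_foldl_filter, pv_lead]
  have hrel : ∀ c ∈ (cs.filter pvRel).dropWhile (· == '-'), pvRel c = true := by
    intro c hc
    exact (List.mem_filter.mp ((List.dropWhile_sublist _).mem hc)).2
  have hhead : ((cs.filter pvRel).dropWhile (· == '-')).head? = some '-' → 0 < (0 : Int) := by
    intro h
    have := List.head?_dropWhile_not (· == '-') (cs.filter pvRel)
    rw [h] at this
    simp at this
  have h := pv_main ((cs.filter pvRel).dropWhile (· == '-')).length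
    ((cs.filter pvRel).dropWhile (· == '-')) le_rfl hrel [] [] 0 le_rfl hhead
    ((pvRstrip ((cs.filter pvRel).dropWhile (· == '-'))).length + 1) (Nat.lt_succ_self _)
  rw [h]
  show _ = pvBGo ((pvRstrip ((cs.filter pvRel).dropWhile (· == '-'))).length + 1) 0
      (pvRstrip ((cs.filter pvRel).dropWhile (· == '-')))
  simp

theorem get_zeroindexed_gap_positions_spec : Claim_equal_get_zeroindexed_gap_positions := by
  intro mask rl _ hpre
  obtain ⟨hrl, -⟩ := hpre
  subst hrl
  unfold Spec_get_zeroindexed_gap_positions get_zeroindexed_gap_positions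
    get_zeroindexed_gap_positions_alt
  have hkey := pv_key mask.toList
  show ((if (mask.toList.foldl pvAStep ([], [], 0, 0, false)).2.2.2.2 then
      (mask.toList.foldl pvAStep ([], [], 0, 0, false)).1.dropLast else
      (mask.toList.foldl pvAStep ([], [], 0, 0, false)).1),
      (mask.toList.foldl pvAStep ([], [], 0, 0, false)).2.1)
    = _
  rw [show ((if (mask.toList.foldl pvAStep ([], [], 0, 0, false)).2.2.2.2 then
      (mask.toList.foldl pvAStep ([], [], 0, 0, false)).1.dropLast else
      (mask.toList.foldl pvAStep ([], [], 0, 0, false)).1),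
      (mask.toList.foldl pvAStep ([], [], 0, 0, false)).2.1)
    = pvFinish (mask.toList.foldl pvAStep ([], [], 0, 0, false)) from rfl, hkey]
  rfl
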